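-- pv_equiv track=rewrite | github.com/YongsHub/TIL | Algorithm/Programmers 고득점Kit/완전탐색/모의고사.py | solution
-- ===== SOURCE A (Python) =====
-- def solution(answers):
--     lst = [[1, 2, 3, 4, 5] * 2000, [2, 1, 2, 3, 2, 4, 2, 5] * 1250, [3, 3, 1, 1, 2, 2, 4, 4, 5, 5] * 1000]
--     answer = []
--     result = 0
--     compareNum = 0
--
--     for i in range(3):
--         for j in range(len(answers)):
--             if answers[j] == lst[i][j]:
--                 result += 1
--         if result > compareNum:
--             answer = []
--             answer.append(i + 1)
--             compareNum = result
--         elif compareNum == result: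
--             answer.append(i + 1)
--         result = 0
--
--     answer.sort()
--     return answer
-- ===== SOURCE B (Python) =====
-- def solution(answers):
--     # Stage 1: one pass building a histogram keyed by (position mod 40, value);
--     # 40 = lcm(5, 8, 10), so a position's residue mod 40 determines all three
--     # pattern values there.  The pass never looks at the patterns.
--     hist = {}
--     for j, a in enumerate(answers):
--         key = (j % 40, a)
--         hist[key] = hist.get(key, 0) + 1
--     # Stage 2: each score is a 40-term table lookup sum, independent of len(answers).
--     pats = [[1, 2, 3, 4, 5], [2, 1, 2, 3, 2, 4, 2, 5], [3, 3, 1, 1, 2, 2, 4, 4, 5, 5]]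
--     scores = [sum(hist.get((r, p[r % len(p)]), 0) for r in range(40)) for p in pats]
--     best = max(scores)
--     return [i + 1 for i in range(3) if scores[i] == best]
-- ===== Notes on version B (the rewrite author's own statement) =====
-- stated objective: alternative
-- what changed: Replaced A's three per-pattern scans of 10000-element materialized pattern lists with a two-stage algorithm: one pattern-blind pass builds a histogram keyed by (index mod 40, value) (40 = lcm of the pattern periods), then each score is a fixed 40-term table-lookup sum independent of the input length, followed by max and a comprehension.
import Mathlib
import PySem

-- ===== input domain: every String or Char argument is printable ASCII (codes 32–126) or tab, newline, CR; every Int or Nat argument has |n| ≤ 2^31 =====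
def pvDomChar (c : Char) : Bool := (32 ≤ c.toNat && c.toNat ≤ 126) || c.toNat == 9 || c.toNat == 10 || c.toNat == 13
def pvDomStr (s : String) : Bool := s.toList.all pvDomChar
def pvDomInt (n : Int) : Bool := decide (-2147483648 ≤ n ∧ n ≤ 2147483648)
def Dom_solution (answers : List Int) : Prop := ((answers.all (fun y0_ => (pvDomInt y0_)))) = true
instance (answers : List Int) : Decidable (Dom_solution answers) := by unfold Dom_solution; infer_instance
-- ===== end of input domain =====

-- B (alternative): a pattern-blind histogram pass keyed by (index mod 40, value) followed by
-- fixed 40-term table-lookup scoring, instead of A's three scans over materialized pattern lists.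


-- ===== PORT A =====
def solution (answers : List Int) : List Int :=
  let lst : List (List Int) :=
    [(List.replicate 2000 ([1, 2, 3, 4, 5] : List Int)).flatten,
     (List.replicate 1250 ([2, 1, 2, 3, 2, 4, 2, 5] : List Int)).flatten,
     (List.replicate 1000 ([3, 3, 1, 1, 2, 2, 4, 4, 5, 5] : List Int)).flatten]
  let st := (PySem.List.pyRange 0 3 1).foldl
    (fun (st : List Int × Int × Int) i =>
      let answer := st.1
      let result := st.2.1
      let compareNum := st.2.2
      let result := (PySem.List.pyRange 0 (PySem.List.len answers) 1).foldl
        (fun r j =>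
          if PySem.List.pyGetD answers j 0 = PySem.List.pyGetD (PySem.List.pyGetD lst i []) j 0
          then r + 1 else r) result
      if result > compareNum then ([i + 1], 0, result)
      else if compareNum = result then (answer ++ [i + 1], 0, compareNum)
      else (answer, 0, compareNum))
    ([], 0, 0)
  PySem.List.sorted st.1 (fun x => x) false

-- ===== PORT B =====
def solution_alt (answers : List Int) : List Int :=
  let hist : PySem.Dict (Int × Int) Int := (PySem.List.enumerate answers 0).foldl
    (fun (d : PySem.Dict (Int × Int) Int) ja =>
      d.insert (PySem.Int.mod ja.1 40, ja.2) (d.getD (PySem.Int.mod ja.1 40, ja.2) 0 + 1))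
    PySem.Dict.empty
  let pats : List (List Int) :=
    [[1, 2, 3, 4, 5], [2, 1, 2, 3, 2, 4, 2, 5], [3, 3, 1, 1, 2, 2, 4, 4, 5, 5]]
  let scores : List Int := pats.map (fun p =>
    ((PySem.List.pyRange 0 40 1).map (fun r =>
      hist.getD (r, PySem.List.pyGetD p (PySem.Int.mod r (PySem.List.len p)) 0) 0)).sum)
  match PySem.List.max? scores (fun x => x) with
  | none => []
  | some best =>
      (PySem.List.pyRange 0 3 1).filterMap
        (fun i => if PySem.List.pyGetD scores i 0 = best then some (i + 1) else none)

-- ===== PRECONDITION & SPEC =====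
-- A indexes its 10000-element patterns at every position of `answers`, so it raises
-- IndexError whenever len(answers) > 10000; Pre_ excludes exactly those inputs.
def Pre_solution (answers : List Int) : Prop := answers.length ≤ 10000
instance (answers : List Int) : Decidable (Pre_solution answers) := by unfold Pre_solution; infer_instance
def pvWitness_solution : List Int := [1, 2, 3, 4, 5]

def Spec_solution (answers : List Int) (out : List Int) : Prop := out = solution_alt answers
instance (answers : List Int) (out : List Int) : Decidable (Spec_solution answers out) := by unfold Spec_solution; infer_instance

-- ===== CLAIM (what is proved, stated in full; the proofs are below) =====
def Claim_equal_solution : Prop := ∀ (answers : List Int), Dom_solution answers → Pre_solution answers → Spec_solution answers (solution answers)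

-- ===== LEMMAS AND PROOFS =====

-- canonical per-pattern count: matches of xs (starting at global index j) against pattern p cycled
def cnt (p : List Int) (k : Nat) (xs : List Int) (j : Nat) : Int :=
  match xs with
  | [] => 0
  | a :: t => (if a = p.getD (j % k) 0 then 1 else 0) + cnt p k t (j + 1)

theorem cnt_nonneg (p : List Int) (k : Nat) (xs : List Int) (j : Nat) : 0 ≤ cnt p k xs j := by
  induction xs generalizing j with
  | nil => simp [cnt]
  | cons a t ih =>
    have := ih (j + 1)
    simp only [cnt]
    split <;> omega

theorem getD_flatten_replicate (p : List Int) (m j : Nat) (hj : j < m * p.length) :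
    ((List.replicate m p).flatten).getD j 0 = p.getD (j % p.length) 0 := by
  induction m generalizing j with
  | zero => omega
  | succ k ih =>
    have hp : 0 < p.length := by by_contra h; simp at h; simp [h] at hj
    rw [List.replicate_succ, List.flatten_cons]
    by_cases hlt : j < p.length
    · rw [List.getD, List.getElem?_append_left hlt, Nat.mod_eq_of_lt hlt]; rfl
    · have h1 : j - p.length < k * p.length := by
        rw [Nat.succ_mul] at hj; omega
      have h2 : (j - p.length) % p.length = j % p.length := by
        conv_rhs => rw [← Nat.sub_add_cancel (Nat.le_of_not_lt hlt)]
        rw [Nat.add_mod_right]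
      rw [List.getD, List.getElem?_append_right (Nat.le_of_not_lt hlt)]
      rw [← h2, ← ih (j - p.length) h1]; rfl

-- A's inner scan over indices, viewed through enumerate, is r + cnt
theorem A_inner (p : List Int) (m : Nat) (xs : List Int) (r : Int) (j : Nat)
    (hj : j + xs.length ≤ m * p.length) :
    (PySem.List.enumerate xs (j : Int)).foldl
      (fun r ja => if ja.2 = PySem.List.pyGetD ((List.replicate m p).flatten) ja.1 0 then r + 1 else r) r
      = r + cnt p p.length xs j := by
  induction xs generalizing j r with
  | nil => simp [PySem.List.enumerate_nil, cnt]
  | cons a t ih =>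
    rw [PySem.List.enumerate_cons]
    simp only [List.foldl_cons, cnt]
    have hcast : ((j : Int) + 1) = ((j + 1 : Nat) : Int) := by push_cast; ring
    rw [hcast, ih _ _ (by simp only [List.length_cons] at hj; omega)]
    rw [PySem.List.pyGetD_natCast, getD_flatten_replicate p m j (by simp only [List.length_cons] at hj; omega)]
    split <;> ring

-- A's inner foldl over the index range equals the enumerate form
theorem A_inner_range (big xs : List Int) (r : Int) :
    (PySem.List.pyRange 0 (PySem.List.len xs) 1).foldl
      (fun r j => if PySem.List.pyGetD xs j 0 = PySem.List.pyGetD big j 0 then r + 1 else r) r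
      = (PySem.List.enumerate xs (0 : Int)).foldl
          (fun r ja => if ja.2 = PySem.List.pyGetD big ja.1 0 then r + 1 else r) r := by
  rw [PySem.List.enumerate_eq_map_pyRange (d := 0), List.foldl_map]

-- B's histogram pass, with the key computation factored out of the fold
theorem foldl_insert_key {κ α : Type} [BEq κ] (key : α → κ) (l : List α) (d : PySem.Dict κ Int) :
    l.foldl (fun d x => d.insert (key x) (d.getD (key x) 0 + 1)) d
    = (l.map key).foldl (fun d x => d.insert x (d.getD x 0 + 1)) d := by
  induction l generalizing d with
  | nil => rfl
  | cons a t ih => simp only [List.foldl_cons, List.map_cons, ih]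

-- B's histogram, looked up at any key, is a count in the keyed list
theorem hist_getD (xs : List Int) (v : Int × Int) :
    ((PySem.List.enumerate xs (0 : Int)).foldl
      (fun (d : PySem.Dict (Int × Int) Int) ja =>
        d.insert (PySem.Int.mod ja.1 40, ja.2) (d.getD (PySem.Int.mod ja.1 40, ja.2) 0 + 1))
      PySem.Dict.empty).getD v 0
    = (((PySem.List.enumerate xs (0 : Int)).map
         (fun ja => (PySem.Int.mod ja.1 40, ja.2))).count v : Int) := by
  rw [foldl_insert_key (fun ja : Int × Int => (PySem.Int.mod ja.1 40, ja.2)),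
    PySem.Dict.getD_foldl_insert_add_one]
  simp [PySem.Dict.empty, PySem.Dict.getD, PySem.Dict.get?]

theorem sum_ite_count (l : List Int) (x c : Int) :
    (l.map (fun r => if r = x then c else 0)).sum = (l.count x : Int) * c := by
  induction l with
  | nil => simp
  | cons b t ih =>
    simp only [List.map_cons, List.sum_cons, ih, List.count_cons]
    by_cases h : b = x
    · subst h; simp; ring
    · have h' : (b == x) = false := by simp [h]
      simp only [h, if_false, h']
      push_cast; ring

theorem count_mod40 (m : Nat) (hm : m < 40) :
    (PySem.List.pyRange 0 40 1).count ((m : Nat) : Int) = 1 := by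
  revert hm
  revert m
  decide

-- the 40-term table-lookup sum over the keyed list is the canonical cyclic-match count
theorem score_eq (p : List Int) (hdvd : p.length ∣ 40) (xs : List Int) (j : Nat) :
    ((PySem.List.pyRange 0 40 1).map (fun r =>
        ((((PySem.List.enumerate xs ((j : Nat) : Int)).map
             (fun ja => (PySem.Int.mod ja.1 40, ja.2))).count
           (r, PySem.List.pyGetD p (PySem.Int.mod r (p.length : Int)) 0) : Nat) : Int))).sum
      = cnt p p.length xs j := by
  induction xs generalizing j with
  | nil =>
    simp [PySem.List.enumerate_nil, cnt]
  | cons a t ih =>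
    rw [PySem.List.enumerate_cons]
    simp only [List.map_cons]
    have hmod : PySem.Int.mod ((j : Nat) : Int) 40 = (((j % 40 : Nat) : Nat) : Int) :=
      PySem.Int.mod_natCast j 40
    have hcast : (((j : Nat) : Int) + 1) = (((j + 1 : Nat) : Nat) : Int) := by push_cast; ring
    rw [hmod, hcast]
    set x : Int := ((j % 40 : Nat) : Int) with hxdef
    have hgx : PySem.List.pyGetD p (PySem.Int.mod x (p.length : Int)) 0 = p.getD (j % p.length) 0 := by
      rw [hxdef, PySem.Int.mod_natCast, PySem.List.pyGetD_natCast,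
        Nat.mod_mod_of_dvd j hdvd]
    simp only [List.count_cons]
    push_cast
    rw [PySem.List.sum_map_add_int, hcast, ih (j + 1)]
    have hpt : ∀ r : Int,
        (if ((x, a) == (r, PySem.List.pyGetD p (PySem.Int.mod r (p.length : Int)) 0)) then (1 : Int) else 0)
        = (if r = x then (if a = p.getD (j % p.length) 0 then (1 : Int) else 0) else 0) := by
      intro r
      by_cases hr : r = x
      · subst hr
        simp [hgx, beq_iff_eq, Prod.mk.injEq]
      · have : ¬ (x = r) := fun e => hr e.symm
        simp [hr, this, beq_iff_eq, Prod.mk.injEq]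
    simp only [hpt]
    rw [sum_ite_count, hxdef, count_mod40 (j % 40) (Nat.mod_lt j (by omega))]
    simp only [cnt, Nat.cast_one, one_mul]
    ring

-- ===== VERDICT (by name: the statement is the Claim_ definition above) =====
set_option maxHeartbeats 2000000 in
theorem solution_spec : Claim_equal_solution := by
  intro answers _hdom hpre
  unfold Pre_solution at hpre
  show solution answers = solution_alt answers
  unfold solution solution_alt
  rw [show PySem.List.pyRange 0 3 1 = [0, 1, 2] from by decide]
  simp only [List.foldl_cons, List.foldl_nil]
  have g0 : ∀ (a b c : List Int), PySem.List.pyGetD [a, b, c] (0 : Int) [] = a := fun _ _ _ => rfl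
  have g1 : ∀ (a b c : List Int), PySem.List.pyGetD [a, b, c] (1 : Int) [] = b := fun _ _ _ => rfl
  have g2 : ∀ (a b c : List Int), PySem.List.pyGetD [a, b, c] (2 : Int) [] = c := fun _ _ _ => rfl
  simp only [g0, g1, g2, A_inner_range]
  have hA0 : ∀ r : Int,
      (PySem.List.enumerate answers (0 : Int)).foldl
        (fun r ja => if ja.2 = PySem.List.pyGetD ((List.replicate 2000 ([1,2,3,4,5] : List Int)).flatten) ja.1 0 then r + 1 else r) r
        = r + cnt [1, 2, 3, 4, 5] 5 answers 0 := by
    intro r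
    have h := A_inner [1, 2, 3, 4, 5] 2000 answers r 0 (by simp only [List.length_cons, List.length_nil]; omega)
    simp only [Nat.cast_zero] at h
    exact h
  have hA1 : ∀ r : Int,
      (PySem.List.enumerate answers (0 : Int)).foldl
        (fun r ja => if ja.2 = PySem.List.pyGetD ((List.replicate 1250 ([2,1,2,3,2,4,2,5] : List Int)).flatten) ja.1 0 then r + 1 else r) r
        = r + cnt [2, 1, 2, 3, 2, 4, 2, 5] 8 answers 0 := by
    intro r
    have h := A_inner [2, 1, 2, 3, 2, 4, 2, 5] 1250 answers r 0 (by simp only [List.length_cons, List.length_nil]; omega)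
    simp only [Nat.cast_zero] at h
    exact h
  have hA2 : ∀ r : Int,
      (PySem.List.enumerate answers (0 : Int)).foldl
        (fun r ja => if ja.2 = PySem.List.pyGetD ((List.replicate 1000 ([3,3,1,1,2,2,4,4,5,5] : List Int)).flatten) ja.1 0 then r + 1 else r) r
        = r + cnt [3, 3, 1, 1, 2, 2, 4, 4, 5, 5] 10 answers 0 := by
    intro r
    have h := A_inner [3, 3, 1, 1, 2, 2, 4, 4, 5, 5] 1000 answers r 0 (by simp only [List.length_cons, List.length_nil]; omega)
    simp only [Nat.cast_zero] at h
    exact h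
  -- B side: histogram lookups become counts, score sums become cnt
  simp only [List.map_cons, List.map_nil, hist_getD]
  have hS0 := score_eq [1, 2, 3, 4, 5] (by decide) answers 0
  have hS1 := score_eq [2, 1, 2, 3, 2, 4, 2, 5] (by decide) answers 0
  have hS2 := score_eq [3, 3, 1, 1, 2, 2, 4, 4, 5, 5] (by decide) answers 0
  simp only [Nat.cast_zero, List.length_cons, List.length_nil, PySem.List.len_eq] at hS0 hS1 hS2 ⊢
  norm_num at hS0 hS1 hS2 ⊢
  rw [hS0, hS1, hS2]
  simp only [hA0, hA1, hA2, zero_add]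
  have n0 := cnt_nonneg [1, 2, 3, 4, 5] 5 answers 0
  have n1 := cnt_nonneg [2, 1, 2, 3, 2, 4, 2, 5] 8 answers 0
  have n2 := cnt_nonneg [3, 3, 1, 1, 2, 2, 4, 4, 5, 5] 10 answers 0
  set c0 := cnt [1, 2, 3, 4, 5] 5 answers 0 with hc0
  set c1 := cnt [2, 1, 2, 3, 2, 4, 2, 5] 8 answers 0 with hc1
  set c2 := cnt [3, 3, 1, 1, 2, 2, 4, 4, 5, 5] 10 answers 0 with hc2
  clear hc0 hc1 hc2 hA0 hA1 hA2 hS0 hS1 hS2 hpre _hdom g0 g1 g2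
  rw [PySem.List.max?_id_cons]
  simp only [List.foldl_cons, List.foldl_nil]
  simp only [List.filterMap_cons, List.filterMap_nil]
  have p0 : PySem.List.pyGetD [c0, c1, c2] (0 : Int) 0 = c0 := rfl
  have p1 : PySem.List.pyGetD [c0, c1, c2] (1 : Int) 0 = c1 := rfl
  have p2 : PySem.List.pyGetD [c0, c1, c2] (2 : Int) 0 = c2 := rfl
  simp only [p0, p1, p2]
  clear p0 p1 p2
  split_ifs <;> (try simp only [] at *) <;> first | omega | decide
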